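-- pv_equiv track=rewrite | github.com/bettybonilla/codewars | 8_kyu/whats_up_next.py | next_item
-- ===== SOURCE A (Python) =====
-- from typing import Iterable, Optional
--
-- def next_item(sequence: Iterable, target: str | int) -> Optional[str | int]:
--     sequence = iter(sequence)
--     while sequence:
--         try:
--             item = next(sequence)
--             if item == target:
--                 return next(sequence)
--         except StopIteration:
--             return None
--
--     return None
-- ===== SOURCE B (Python) =====
-- def next_item(sequence, target):
--     seq = list(sequence)
--     nxt = {}
--     for i in range(len(seq) - 1):
--         nxt.setdefault(seq[i], seq[i + 1])
--     return nxt.get(target)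
-- ===== Notes on version B (the rewrite author's own statement) =====
-- stated objective: alternative
-- what changed: Replaces A's single scan with manual iterator stepping (next() twice, try/except StopIteration) by building a successor dictionary once (setdefault keeps the first occurrence's successor) and answering with a single hash lookup.
import Mathlib
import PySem

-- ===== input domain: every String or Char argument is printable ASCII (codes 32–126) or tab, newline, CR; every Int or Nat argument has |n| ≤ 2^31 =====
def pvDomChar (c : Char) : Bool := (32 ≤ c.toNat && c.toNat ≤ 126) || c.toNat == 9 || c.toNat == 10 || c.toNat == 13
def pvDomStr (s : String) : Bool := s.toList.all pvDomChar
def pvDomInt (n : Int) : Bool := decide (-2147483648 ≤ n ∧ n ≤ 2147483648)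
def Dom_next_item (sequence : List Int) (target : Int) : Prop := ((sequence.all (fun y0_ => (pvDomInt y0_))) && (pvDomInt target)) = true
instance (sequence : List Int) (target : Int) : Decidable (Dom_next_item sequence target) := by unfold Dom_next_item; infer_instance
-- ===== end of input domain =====

-- B builds a successor dictionary once (setdefault keeps the first occurrence's successor) and
-- answers with a single lookup, instead of A's scan with manual iterator stepping (alternative).
-- ===== PORT A =====
-- literal port of A: step the iterator; on a match return next(sequence) (StopIteration -> none)
def next_item (sequence : List Int) (target : Int) : Option Int :=
  match sequence with
  | [] => none
  | x :: rest => if x = target then rest.head? else next_item rest target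

-- ===== PORT B =====
-- port of B: for i in range(len(seq)-1): nxt.setdefault(seq[i], seq[i+1]); return nxt.get(target)
def next_item_alt (sequence : List Int) (target : Int) : Option Int :=
  let nxt : PySem.Dict Int Int :=
    (PySem.List.pyRange 0 ((sequence.length : Int) - 1) 1).foldl
      (fun d i => d.setdefault (PySem.List.pyGetD sequence i 0)
                               (PySem.List.pyGetD sequence (i + 1) 0))
      PySem.Dict.empty
  nxt.get? target

-- ===== PRECONDITION & SPEC =====
def Spec_next_item (sequence : List Int) (target : Int) (out : Option Int) : Prop := out = next_item_alt sequence target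
instance (sequence : List Int) (target : Int) (out : Option Int) : Decidable (Spec_next_item sequence target out) := by unfold Spec_next_item; infer_instance

-- ===== CLAIM (what is proved, stated in full; the proofs are below) =====
def Claim_equal_next_item : Prop := ∀ (sequence : List Int) (target : Int), Dom_next_item sequence target → Spec_next_item sequence target (next_item sequence target)

-- ===== LEMMAS AND PROOFS =====

-- A's scan returns the second component of the first consecutive pair whose first equals target.
theorem next_item_eq_find (sequence : List Int) (target : Int) :
    next_item sequence target
      = ((sequence.zip sequence.tail).find? (fun p => p.1 == target)).map Prod.snd := by
  induction sequence with
  | nil => rfl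
  | cons x rest ih =>
    simp only [next_item, List.tail_cons]
    by_cases h : x = target
    · cases rest <;> simp [h, List.zip]
    · cases rest with
      | nil => simp [h, next_item]
      | cons y ys =>
        have hb : (x == target) = false := by simp [h]
        simp only [List.zip_cons_cons, List.find?, hb, if_neg h]
        simpa [List.tail_cons] using ih

-- looking up in a dict filled by setdefault over pairs: the old binding wins, else first matching pair
theorem fold_setdefault_get? (t : Int) (pairs : List (Int × Int)) (d : PySem.Dict Int Int) :
    (pairs.foldl (fun d p => d.setdefault p.1 p.2) d).get? t
      = (d.get? t).or ((pairs.find? (fun p => p.1 == t)).map Prod.snd) := by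
  induction pairs generalizing d with
  | nil => simp
  | cons p ps ih =>
    have hsd : d.setdefault p.1 p.2 = if d.contains p.1 then d else d.insert p.1 p.2 := by
      simp [PySem.Dict.setdefault, PySem.Dict.insert]
      split <;> simp_all [PySem.Dict.contains]
    simp only [List.foldl_cons, ih, hsd]
    by_cases hc : d.contains p.1 = true
    · simp only [if_pos hc]
      rw [PySem.Dict.contains_eq_isSome_get?] at hc
      by_cases ht : t = p.1
      · obtain ⟨v, hv⟩ := Option.isSome_iff_exists.mp (ht ▸ hc)
        simp [hv]
      · have hb : (p.1 == t) = false := beq_eq_false_iff_ne.mpr (fun h => ht h.symm)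
        simp [List.find?, hb]
    · simp only [if_neg hc]
      rw [PySem.Dict.contains_eq_isSome_get?] at hc
      have hn : d.get? p.1 = none := Option.not_isSome_iff_eq_none.mp hc
      by_cases ht : t = p.1
      · have hb : (p.1 == t) = true := by simp [ht]
        simp [ht, hn, List.find?]
      · have hb : (p.1 == t) = false := beq_eq_false_iff_ne.mpr (fun h => ht h.symm)
        simp [PySem.Dict.get?_insert, ht, List.find?, hb]

-- the index range B iterates over, read through seq, is exactly the consecutive-pairs list
theorem range_pairs_eq (seq : List Int) :
    (PySem.List.pyRange 0 ((seq.length : Int) - 1) 1).map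
        (fun i => (PySem.List.pyGetD seq i 0, PySem.List.pyGetD seq (i + 1) 0))
      = seq.zip seq.tail := by
  cases seq with
  | nil => decide
  | cons x rest =>
    set s := x :: rest with hs
    have hlen : 1 ≤ s.length := by simp [hs]
    have hcast : ((s.length : Int) - 1) = ((s.length - 1 : Nat) : Int) := by omega
    rw [hcast, PySem.List.pyRange_zero_natCast, List.map_map]
    apply List.ext_getElem
    · simp
    · intro i h1 h2
      have hi : i < s.length - 1 := by simpa using h1
      have hi1 : i + 1 < s.length := by omega
      have hcast2 : ((i : Int) + 1) = ((i + 1 : Nat) : Int) := by omega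
      simp only [List.getElem_map, List.getElem_range, Function.comp_apply,
        PySem.List.pyGetD_natCast, hcast2, List.getElem_zip, List.getElem_tail]
      rw [List.getD_eq_getElem _ _ (by omega), List.getD_eq_getElem _ _ hi1]

theorem next_item_alt_eq (sequence : List Int) (target : Int) :
    next_item sequence target = next_item_alt sequence target := by
  have hfold : (PySem.List.pyRange 0 ((sequence.length : Int) - 1) 1).foldl
      (fun d i => d.setdefault (PySem.List.pyGetD sequence i 0)
                               (PySem.List.pyGetD sequence (i + 1) 0))
      PySem.Dict.empty
    = ((PySem.List.pyRange 0 ((sequence.length : Int) - 1) 1).map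
        (fun i => (PySem.List.pyGetD sequence i 0, PySem.List.pyGetD sequence (i + 1) 0))).foldl
        (fun d p => d.setdefault p.1 p.2) PySem.Dict.empty :=
    (List.foldl_map
      (f := fun i => (PySem.List.pyGetD sequence i 0, PySem.List.pyGetD sequence (i + 1) 0))
      (g := fun d p => PySem.Dict.setdefault d p.1 p.2)).symm
  simp only [next_item_alt]
  rw [hfold, range_pairs_eq, fold_setdefault_get?]
  simp [next_item_eq_find]

-- ===== VERDICT (by name: the statement is the Claim_ definition above) =====
theorem next_item_spec : Claim_equal_next_item := by
  intro sequence target _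
  exact next_item_alt_eq sequence target
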